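-- pv_equiv track=rewrite | github.com/mfcrevelin-landisgyr/HighEnna | HighEnna-Backend/source_files/DFA/plot_dfa.py | label_bytes
-- ===== SOURCE A (Python) =====
-- import string
--
-- SPECIAL_GROUPS = {
--     '\\\\w': set(ord(c) for c in string.ascii_lowercase),
--     '\\\\W': set(ord(c) for c in string.ascii_uppercase),
--     '\\\\d': set(ord(c) for c in string.digits),
--     '\\\\s': {ord(' '), ord('\t')},
--     '\\\\n': {ord('\n')},
-- }
--
-- def is_printable(c):
--     return 32 <= c <= 126
--
-- def format_byte(b):
--     return f'"{chr(b)}"' if is_printable(b) else f'0x{b:02X}'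
--
-- def format_range(start, end):
--     start_str = format_byte(start)
--     end_str = format_byte(end)
--     return f'[{start_str},{end_str}]' if start != end else start_str
--
-- def extract_ranges(sorted_bytes):
--     ranges = []
--     i = 0
--     while i < len(sorted_bytes):
--         start = sorted_bytes[i]
--         end = start
--         while i + 1 < len(sorted_bytes) and sorted_bytes[i + 1] == end + 1:
--             end += 1
--             i += 1
--         ranges.append((start, end))
--         i += 1
--     return ranges
--
-- def label_bytes(byte_set):
--     remaining = set(byte_set)
--     labels = []
--
--     for label, group in SPECIAL_GROUPS.items():
--         if group.issubset(remaining):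
--             labels.append(label)
--             remaining -= group
--
--     if remaining:
--         sorted_bytes = sorted(remaining)
--         for start, end in extract_ranges(sorted_bytes):
--             labels.append(format_range(start, end))
--
--     return labels
-- ===== SOURCE B (Python) =====
-- import string
--
-- SPECIAL_GROUPS = {
--     '\\\\w': set(ord(c) for c in string.ascii_lowercase),
--     '\\\\W': set(ord(c) for c in string.ascii_uppercase),
--     '\\\\d': set(ord(c) for c in string.digits),
--     '\\\\s': {ord(' '), ord('\t')},
--     '\\\\n': {ord('\n')},
-- }
--
-- def is_printable(c):
--     return 32 <= c <= 126
--
-- def format_byte(b):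
--     return f'"{chr(b)}"' if is_printable(b) else f'0x{b:02X}'
--
-- def format_range(start, end):
--     start_str = format_byte(start)
--     end_str = format_byte(end)
--     return f'[{start_str},{end_str}]' if start != end else start_str
--
-- def label_bytes(byte_set):
--     s = set(byte_set)
--     # the special groups are pairwise disjoint, so each subset test can be made
--     # against the original set instead of a shrinking remainder
--     taken = [(label, group) for label, group in SPECIAL_GROUPS.items() if group <= s]
--     covered = set()
--     for _, group in taken:
--         covered |= group
--     rem = s - covered
--     # a run starts at b iff b-1 is absent, ends at b iff b+1 is absent:
--     # pairing the sorted starts with the sorted ends yields the maximal runs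
--     starts = sorted(b for b in rem if b - 1 not in rem)
--     ends = sorted(b for b in rem if b + 1 not in rem)
--     return [label for label, _ in taken] + [format_range(a, b) for a, b in zip(starts, ends)]
-- ===== Notes on version B (the rewrite author's own statement) =====
-- stated objective: alternative
-- what changed: B replaces A's sequential subtract-and-retest group loop by independent subset tests against the original set (valid because the special groups are pairwise disjoint), and replaces A's index-based look-ahead run scan entirely by a boundary characterisation: run starts are the bytes b with b-1 absent, run ends those with b+1 absent, and zipping the two sorted lists yields the maximal runs.
import Mathlib
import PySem

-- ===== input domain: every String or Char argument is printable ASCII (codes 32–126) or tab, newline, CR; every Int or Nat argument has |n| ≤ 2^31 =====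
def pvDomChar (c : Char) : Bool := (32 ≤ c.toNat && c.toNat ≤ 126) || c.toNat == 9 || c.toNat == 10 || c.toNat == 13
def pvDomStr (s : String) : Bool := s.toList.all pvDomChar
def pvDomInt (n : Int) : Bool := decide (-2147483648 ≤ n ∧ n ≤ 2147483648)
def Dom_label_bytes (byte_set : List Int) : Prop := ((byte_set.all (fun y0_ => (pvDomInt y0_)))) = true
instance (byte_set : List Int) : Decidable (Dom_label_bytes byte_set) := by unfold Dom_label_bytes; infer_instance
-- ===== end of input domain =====

-- B exploits that the special groups are pairwise disjoint to test each group against the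
-- original set (no shrinking remainder), and replaces A's look-ahead run scan by a boundary
-- characterisation: runs are the sorted run-starts (b with b-1 absent) zipped with the
-- sorted run-ends (b with b+1 absent).

-- shared module-level context (SPECIAL_GROUPS and the formatting helpers, identical in both sources)
def SPECIAL_GROUPS : List (String × List Int) :=
  [ ("\\\\w", (List.range 26).map (fun i => (97 + i : Int)))
  , ("\\\\W", (List.range 26).map (fun i => (65 + i : Int)))
  , ("\\\\d", (List.range 10).map (fun i => (48 + i : Int)))
  , ("\\\\s", [32, 9])
  , ("\\\\n", [10]) ]

def hexChar (m : Nat) : Char := if m < 10 then Char.ofNat (48 + m) else Char.ofNat (55 + m)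

-- digits of n in uppercase hex, empty for 0 (exact port of Python's '{:X}' digit expansion)
def hexDigits (n : Nat) : List Char :=
  if h : n = 0 then [] else hexDigits (n / 16) ++ [hexChar (n % 16)]
  decreasing_by exact Nat.div_lt_self (Nat.pos_of_ne_zero h) (by norm_num)

-- format(b, '02X'): sign, then digits zero-padded so the whole string (incl. sign) has width ≥ 2
def hexFmt (b : Int) : String :=
  let digs := if b.natAbs = 0 then ['0'] else hexDigits b.natAbs
  if b < 0 then String.mk ('-' :: digs)
  else String.mk (if digs.length < 2 then '0' :: digs else digs)

def format_byte (b : Int) : String :=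
  if 32 ≤ b ∧ b ≤ 126 then "\"" ++ String.mk [Char.ofNat b.toNat] ++ "\"" else "0x" ++ hexFmt b

def format_range (start stop : Int) : String :=
  if start ≠ stop then "[" ++ format_byte start ++ "," ++ format_byte stop ++ "]" else format_byte start

-- ===== PORT A =====
-- inner while of extract_ranges: extend the run (start,e) while the next byte is e+1;
-- on a break, append the range and restart the outer loop at the next byte
def runA (start e : Int) : List Int → List (Int × Int)
  | [] => [(start, e)]
  | y :: r => if y = e + 1 then runA start y r else (start, e) :: runA y y r

def extract_ranges : List Int → List (Int × Int)
  | [] => []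
  | x :: rest => runA x x rest

-- body of A's for-loop over SPECIAL_GROUPS.items(): subset test against the shrinking remainder
def stepA (st : PySem.Set Int × List String) (lg : String × List Int) : PySem.Set Int × List String :=
  if PySem.Set.issubset (PySem.Set.ofList lg.2) st.1
  then (PySem.Set.diff st.1 lg.2, st.2 ++ [lg.1])
  else st

def label_bytes (byte_set : List Int) : List String :=
  let st := SPECIAL_GROUPS.foldl stepA (PySem.Set.ofList byte_set, [])
  if st.1 ≠ [] then
    st.2 ++ (extract_ranges (PySem.List.sorted st.1 (fun x => x) false)).map (fun p => format_range p.1 p.2)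
  else st.2

-- ===== PORT B =====
def label_bytes_alt (byte_set : List Int) : List String :=
  let s : PySem.Set Int := PySem.Set.ofList byte_set
  let taken := SPECIAL_GROUPS.filter (fun lg => PySem.Set.issubset (PySem.Set.ofList lg.2) s)
  let covered := taken.foldl (fun (c : PySem.Set Int) lg => PySem.Set.union c lg.2) PySem.Set.empty
  let rem := PySem.Set.diff s covered
  let starts := PySem.List.sorted (rem.filter (fun b => !(PySem.Set.contains rem (b - 1)))) (fun x => x) false
  let ends := PySem.List.sorted (rem.filter (fun b => !(PySem.Set.contains rem (b + 1)))) (fun x => x) false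
  taken.map (fun lg => lg.1) ++ (starts.zip ends).map (fun p => format_range p.1 p.2)

-- ===== PRECONDITION & SPEC =====
def Spec_label_bytes (byte_set : List Int) (out : List String) : Prop := out = label_bytes_alt byte_set
instance (byte_set : List Int) (out : List String) : Decidable (Spec_label_bytes byte_set out) := by unfold Spec_label_bytes; infer_instance

-- ===== CLAIM =====
def Claim_equal_label_bytes : Prop := ∀ (byte_set : List Int), Dom_label_bytes byte_set → Spec_label_bytes byte_set (label_bytes byte_set)

-- ===== LEMMAS AND PROOFS =====

-- membership in B's covered-union fold
theorem mem_foldl_union (x : Int) (ts : List (String × List Int)) : ∀ (c : PySem.Set Int),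
    (x ∈ ts.foldl (fun (c : PySem.Set Int) lg => PySem.Set.union c lg.2) c ↔ x ∈ c ∨ ∃ g ∈ ts, x ∈ g.2) := by
  induction ts with
  | nil => intro c; simp
  | cons g ts ih =>
    intro c
    rw [List.foldl_cons, ih, PySem.Set.mem_union]
    constructor
    · rintro (⟨h | h⟩ | ⟨h, hg, hx⟩)
      · exact Or.inl h
      · exact Or.inr ⟨g, List.mem_cons_self, h⟩
      · exact Or.inr ⟨h, List.mem_cons_of_mem _ hg, hx⟩
    · rintro (h | ⟨h, hg, hx⟩)
      · exact Or.inl (Or.inl h)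
      · rcases List.mem_cons.1 hg with rfl | hg
        · exact Or.inl (Or.inr hx)
        · exact Or.inr ⟨h, hg, hx⟩

-- A's group loop characterised non-sequentially: since the groups still to come are disjoint
-- from everything already removed, each subset test against the shrinking remainder equals the
-- test against the full set s; labels are the filtered names, remainder = sA minus taken groups
theorem loopA (s : List Int) (gs : List (String × List Int)) : ∀ (sA : PySem.Set Int) (labels : List String),
    sA.Nodup →
    (∀ g ∈ gs, ∀ b ∈ g.2, (b ∈ sA ↔ b ∈ s)) →
    List.Pairwise (fun g h => ∀ b, b ∈ g.2 → b ∉ h.2) gs →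
    (gs.foldl stepA (sA, labels)).2
        = labels ++ (gs.filter (fun g => PySem.Set.issubset (PySem.Set.ofList g.2) s)).map (fun g => g.1)
    ∧ (gs.foldl stepA (sA, labels)).1.Nodup
    ∧ (∀ x, x ∈ (gs.foldl stepA (sA, labels)).1 ↔
        x ∈ sA ∧ ∀ g ∈ gs, PySem.Set.issubset (PySem.Set.ofList g.2) s → x ∉ g.2) := by
  induction gs with
  | nil => intro sA labels h1 _ _; refine ⟨by simp, h1, by simp⟩
  | cons g gs ih =>
    intro sA labels h1 h2 h3
    have htest : PySem.Set.issubset (PySem.Set.ofList g.2) sA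
        = PySem.Set.issubset (PySem.Set.ofList g.2) s := by
      by_cases hc : ∀ b ∈ g.2, b ∈ s
      · have hL : PySem.Set.issubset (PySem.Set.ofList g.2) sA = true := by
          rw [PySem.Set.issubset_iff]; intro b hb
          exact (h2 g List.mem_cons_self b (by simpa using hb)).2 (hc b (by simpa using hb))
        have hR : PySem.Set.issubset (PySem.Set.ofList g.2) s = true := by
          rw [PySem.Set.issubset_iff]; intro b hb; exact hc b (by simpa using hb)
        rw [hL, hR]
      · push_neg at hc
        obtain ⟨b, hb, hbn⟩ := hc
        have hL : PySem.Set.issubset (PySem.Set.ofList g.2) sA = false := by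
          rw [Bool.eq_false_iff]; intro hcon
          rw [PySem.Set.issubset_iff] at hcon
          exact hbn ((h2 g List.mem_cons_self b hb).1 (hcon b (by simpa using hb)))
        have hR : PySem.Set.issubset (PySem.Set.ofList g.2) s = false := by
          rw [Bool.eq_false_iff]; intro hcon
          rw [PySem.Set.issubset_iff] at hcon
          exact hbn (hcon b (by simpa using hb))
        rw [hL, hR]
    have hdisj : ∀ h ∈ gs, ∀ b, b ∈ g.2 → b ∉ h.2 := fun h hh => (List.pairwise_cons.1 h3).1 h hh
    rw [List.foldl_cons]
    by_cases hsub : PySem.Set.issubset (PySem.Set.ofList g.2) s = true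
    · have hstep : stepA (sA, labels) g = (PySem.Set.diff sA g.2, labels ++ [g.1]) := by
        simp [stepA, htest, hsub]
      rw [hstep]
      have h2' : ∀ h ∈ gs, ∀ b ∈ h.2, (b ∈ PySem.Set.diff sA g.2 ↔ b ∈ s) := by
        intro h hh b hb
        rw [PySem.Set.mem_diff]
        have : b ∉ g.2 := fun hbg => hdisj h hh b hbg hb
        simp [this, h2 h (List.mem_cons_of_mem _ hh) b hb]
      obtain ⟨hl, hn, hm⟩ := ih (PySem.Set.diff sA g.2) (labels ++ [g.1])
        (PySem.Set.nodup_diff _ _ h1) h2' (List.pairwise_cons.1 h3).2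
      refine ⟨?_, hn, ?_⟩
      · rw [hl]; simp [hsub]
      · intro x
        rw [hm x, PySem.Set.mem_diff]
        constructor
        · rintro ⟨⟨hx, hxg⟩, hrest⟩
          refine ⟨hx, ?_⟩
          intro h hh hhs
          rcases List.mem_cons.1 hh with rfl | hh
          · exact hxg
          · exact hrest h hh hhs
        · rintro ⟨hx, hall⟩
          exact ⟨⟨hx, hall g List.mem_cons_self hsub⟩,
            fun h hh hhs => hall h (List.mem_cons_of_mem _ hh) hhs⟩
    · have hsub' : PySem.Set.issubset (PySem.Set.ofList g.2) s = false := Bool.eq_false_iff.2 hsub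
      have hstep : stepA (sA, labels) g = (sA, labels) := by
        simp [stepA, htest, hsub']
      rw [hstep]
      obtain ⟨hl, hn, hm⟩ := ih sA labels h1
        (fun h hh => h2 h (List.mem_cons_of_mem _ hh)) (List.pairwise_cons.1 h3).2
      refine ⟨?_, hn, ?_⟩
      · rw [hl]; simp [hsub']
      · intro x
        rw [hm x]
        constructor
        · rintro ⟨hx, hrest⟩
          refine ⟨hx, fun h hh hhs => ?_⟩
          rcases List.mem_cons.1 hh with rfl | hh
          · exact absurd hhs hsub
          · exact hrest h hh hhs
        · rintro ⟨hx, hall⟩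
          exact ⟨hx, fun h hh hhs => hall h (List.mem_cons_of_mem _ hh) hhs⟩

-- the boundary characterisation of A's run scan: on a strictly increasing tail whose elements
-- all exceed e, the runs are the starts (b-1 absent) zipped with the ends (b+1 absent)
theorem runA_zip : ∀ (l : List Int) (start e : Int),
    l.Pairwise (· < ·) → (∀ x ∈ l, e < x) →
    runA start e l =
      List.zip (start :: l.filter (fun b => !((e :: l).contains (b - 1))))
               ((e :: l).filter (fun b => !(l.contains (b + 1)))) := by
  intro l
  induction l with
  | nil => intro start e _ _; simp [runA, List.zip]
  | cons y r ih =>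
    intro start e hp he
    have hyr : ∀ x ∈ r, y < x := fun x hx => (List.pairwise_cons.1 hp).1 x hx
    have hey : e < y := he y List.mem_cons_self
    by_cases hc : y = e + 1
    · subst hc
      have hstarts : ((e + 1) :: r).filter (fun b => !((e :: (e + 1) :: r).contains (b - 1)))
          = r.filter (fun b => !(((e + 1) :: r).contains (b - 1))) := by
        rw [List.filter_cons_of_neg (by simp)]
        apply List.filter_congr
        intro b hb
        have h1 : e + 1 < b := hyr b hb
        have : b - 1 ≠ e := by omega
        simp [this]
      have hends : (e :: (e + 1) :: r).filter (fun b => !(((e + 1) :: r).contains (b + 1)))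
          = ((e + 1) :: r).filter (fun b => !(r.contains (b + 1))) := by
        rw [List.filter_cons_of_neg (by simp)]
        apply List.filter_congr
        intro b hb
        have h1 : e + 1 ≤ b := by
          rcases List.mem_cons.1 hb with rfl | hb
          · exact le_refl _
          · exact le_of_lt (hyr b hb)
        have : b + 1 ≠ e + 1 := by omega
        simp [this]
      rw [show runA start e ((e + 1) :: r) = runA start (e + 1) r by simp [runA], hstarts, hends]
      exact ih start (e + 1) (List.pairwise_cons.1 hp).2 hyr
    · have hey1 : e + 1 < y := by omega
      have hstarts : (y :: r).filter (fun b => !((e :: y :: r).contains (b - 1)))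
          = y :: r.filter (fun b => !((y :: r).contains (b - 1))) := by
        rw [List.filter_cons_of_pos]
        · congr 1
          apply List.filter_congr
          intro b hb
          have h1 : y < b := hyr b hb
          have : b - 1 ≠ e := by omega
          simp [this]
        · have h1 : y - 1 ≠ e := by omega
          have h2 : y - 1 ≠ y := by omega
          have h3 : y - 1 ∉ r := fun hmem => absurd (hyr _ hmem) (by omega)
          simp [h1, h2, h3]
      have hends : (e :: y :: r).filter (fun b => !((y :: r).contains (b + 1)))
          = e :: (y :: r).filter (fun b => !(r.contains (b + 1))) := by
        rw [List.filter_cons_of_pos]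
        · congr 1
          apply List.filter_congr
          intro b hb
          have h1 : y ≤ b := by
            rcases List.mem_cons.1 hb with rfl | hb
            · exact le_refl _
            · exact le_of_lt (hyr b hb)
          have : b + 1 ≠ y := by omega
          simp [this]
        · have h1 : e + 1 ≠ y := by omega
          have h2 : e + 1 ∉ r := fun hmem => absurd (hyr _ hmem) (by omega)
          simp [h1, h2]
      rw [show runA start e (y :: r) = (start, e) :: runA y y r by simp [runA, hc],
          hstarts, hends,
          ih y y (List.pairwise_cons.1 hp).2 hyr]
      rfl

-- corollary for the whole list
theorem extract_zip (l : List Int) (hp : l.Pairwise (· < ·)) :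
    extract_ranges l =
      List.zip (l.filter (fun b => !(l.contains (b - 1)))) (l.filter (fun b => !(l.contains (b + 1)))) := by
  cases l with
  | nil => simp [extract_ranges]
  | cons x rest =>
    have hlt : ∀ y ∈ rest, x < y := fun y hy => (List.pairwise_cons.1 hp).1 y hy
    rw [show extract_ranges (x :: rest) = runA x x rest from rfl,
        runA_zip rest x x (List.pairwise_cons.1 hp).2 hlt]
    congr 1
    · rw [List.filter_cons_of_pos]
      have h2 : x - 1 ≠ x := by omega
      have h3 : x - 1 ∉ rest := fun hmem => absurd (hlt _ hmem) (by omega)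
      simp [h2, h3]
    · apply List.filter_congr
      intro b hb
      have h1 : x ≤ b := by
        rcases List.mem_cons.1 hb with rfl | hb
        · exact le_refl _
        · exact le_of_lt (hlt b hb)
      have : b + 1 ≠ x := by omega
      simp [this]

-- sorting a nodup list is strictly increasing
theorem sorted_pairwise_lt_of_nodup (l : List Int) (hn : l.Nodup) :
    (PySem.List.sorted l (fun x => x) false).Pairwise (· < ·) := by
  have hle := PySem.List.sorted_pairwise l (fun x => x)
  have hnd : (PySem.List.sorted l (fun x => x) false).Nodup :=
    (PySem.List.sorted_perm l (fun x => x) false).nodup_iff.2 hn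
  exact (hle.and hnd).imp (by rintro a b ⟨h1, h2⟩; exact lt_of_le_of_ne h1 h2)

-- sorting commutes with filtering on a nodup list
theorem sorted_filter (l : List Int) (hn : l.Nodup) (p : Int → Bool) :
    PySem.List.sorted (l.filter p) (fun x => x) false
      = (PySem.List.sorted l (fun x => x) false).filter p := by
  apply PySem.List.sorted_eq_of_perm_of_pairwise_lt
  · exact (PySem.List.sorted_perm l (fun x => x) false).filter p
  · exact (sorted_pairwise_lt_of_nodup l hn).filter p

-- contains respects membership-equal lists
theorem contains_congr (u v : List Int) (h : ∀ x, x ∈ u ↔ x ∈ v) (a : Int) :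
    u.contains a = v.contains a := by
  by_cases hm : a ∈ u
  · simp [hm, (h a).1 hm]
  · have hv : a ∉ v := fun hv => hm ((h a).2 hv)
    simp [hm, hv]

-- ===== VERDICT =====
theorem label_bytes_spec : Claim_equal_label_bytes := by
  intro byte_set _
  unfold Spec_label_bytes label_bytes label_bytes_alt
  simp only []
  set s : PySem.Set Int := PySem.Set.ofList byte_set with hs
  have hdisj : List.Pairwise (fun (g h : String × List Int) => ∀ b, b ∈ g.2 → b ∉ h.2) SPECIAL_GROUPS := by
    decide
  obtain ⟨hlab, hAnodup, hAmem⟩ := loopA s SPECIAL_GROUPS s []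
    (PySem.Set.nodup_ofList _) (fun _ _ _ _ => Iff.rfl) hdisj
  set rA := (SPECIAL_GROUPS.foldl stepA (s, ([] : List String))).1 with hrA
  set taken := SPECIAL_GROUPS.filter (fun lg => PySem.Set.issubset (PySem.Set.ofList lg.2) s) with htaken
  set covered := taken.foldl (fun (c : PySem.Set Int) lg => PySem.Set.union c lg.2) PySem.Set.empty with hcov
  set rem := PySem.Set.diff s covered with hrem
  -- A's remainder and B's rem are membership-equal nodup lists
  have hmemeq : ∀ x, x ∈ rA ↔ x ∈ rem := by
    intro x
    rw [hAmem x, hrem, PySem.Set.mem_diff, hcov, mem_foldl_union]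
    simp only [PySem.Set.empty, List.not_mem_nil, false_or, not_exists, not_and]
    constructor
    · rintro ⟨hx, hall⟩
      refine ⟨hx, fun g hg => ?_⟩
      rw [htaken, List.mem_filter] at hg
      exact hall g hg.1 hg.2
    · rintro ⟨hx, hall⟩
      refine ⟨hx, fun g hg hgs => hall g ?_⟩
      rw [htaken, List.mem_filter]; exact ⟨hg, hgs⟩
  have hremnodup : rem.Nodup := PySem.Set.nodup_diff _ _ (PySem.Set.nodup_ofList _)
  have hperm : rA.Perm rem := (List.perm_ext_iff_of_nodup hAnodup hremnodup).2 hmemeq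
  have hsortedeq : PySem.List.sorted rA (fun x => x) false = PySem.List.sorted rem (fun x => x) false :=
    PySem.List.sorted_eq_sorted_of_perm _ _ _ (fun a b h => h) hperm
  -- labels agree
  rw [hlab]
  simp only [List.nil_append]
  -- run part
  set L := PySem.List.sorted rem (fun x => x) false with hL
  have hLp : L.Pairwise (· < ·) := sorted_pairwise_lt_of_nodup rem hremnodup
  have hLmem : ∀ x, x ∈ L ↔ x ∈ rem := fun x => PySem.List.mem_sorted rem (fun x => x) false x
  have hstarts : PySem.List.sorted (rem.filter (fun b => !(PySem.Set.contains rem (b - 1)))) (fun x => x) false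
      = L.filter (fun b => !(L.contains (b - 1))) := by
    have h1 : rem.filter (fun b => !(PySem.Set.contains rem (b - 1)))
        = rem.filter (fun b => !(L.contains (b - 1))) := by
      apply List.filter_congr
      intro b _
      simp only [PySem.Set.contains_eq_listContains]
      rw [contains_congr L rem hLmem (b - 1)]
    rw [h1, sorted_filter rem hremnodup, ← hL]
  have hends : PySem.List.sorted (rem.filter (fun b => !(PySem.Set.contains rem (b + 1)))) (fun x => x) false
      = L.filter (fun b => !(L.contains (b + 1))) := by
    have h1 : rem.filter (fun b => !(PySem.Set.contains rem (b + 1)))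
        = rem.filter (fun b => !(L.contains (b + 1))) := by
      apply List.filter_congr
      intro b _
      simp only [PySem.Set.contains_eq_listContains]
      rw [contains_congr L rem hLmem (b + 1)]
    rw [h1, sorted_filter rem hremnodup, ← hL]
  by_cases hnil : rA = []
  · have hremnil : rem = [] := List.eq_nil_iff_forall_not_mem.2 (fun x hx => by
      rw [← hmemeq x] at hx; rw [hnil] at hx; exact List.not_mem_nil hx)
    rw [if_neg (by simp [hnil]), hstarts, hends, hL, hremnil]
    simp [PySem.List.sorted]
  · rw [if_pos hnil, hsortedeq, extract_zip L hLp, ← hstarts, ← hends]
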